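-- pv_equiv track=rewrite | github.com/kevinlargey/Fantasy-Football-Project | Football_Project_functions.py | scrub_names
-- ===== SOURCE A (Python) =====
-- def scrub_names(player_names):
--     ''' function: scrub_names
--         input: player_names(list)
--         returns: scrubbed_names, new list of names
--
--         This function will take the list of names from either
--         the fantasy draft list of names or the actual results
--         list of names and remove any symbols that will prevent
--         the names from being matched later on
--     '''
--
--     # new names list is initialized
--     scrubbed_names = []
--     # old list of names is traversed, unwanted symbols are removed
--     for name in player_names:
--         name = name.replace("+","")
--         name = name.replace("*","")
--         name = name.replace("'","")
--         name = name.replace(".","")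
--         name = name.upper()
--         scrubbed_names.append(name)
--
--     return scrubbed_names
-- ===== SOURCE B (Python) =====
-- REMOVED = {'+', '*', "'", '.'}
--
-- def scrub_names(player_names):
--     return [''.join(c for c in name if c not in REMOVED).upper()
--             for name in player_names]
-- ===== Notes on version B (the rewrite author's own statement) =====
-- stated objective: simpler
-- what changed: Replaces the four sequential full-string replace scans and the explicit accumulator loop with a single per-name character-filter pass against a fixed removed-set, followed by upper, in one list comprehension.
import Mathlib
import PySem

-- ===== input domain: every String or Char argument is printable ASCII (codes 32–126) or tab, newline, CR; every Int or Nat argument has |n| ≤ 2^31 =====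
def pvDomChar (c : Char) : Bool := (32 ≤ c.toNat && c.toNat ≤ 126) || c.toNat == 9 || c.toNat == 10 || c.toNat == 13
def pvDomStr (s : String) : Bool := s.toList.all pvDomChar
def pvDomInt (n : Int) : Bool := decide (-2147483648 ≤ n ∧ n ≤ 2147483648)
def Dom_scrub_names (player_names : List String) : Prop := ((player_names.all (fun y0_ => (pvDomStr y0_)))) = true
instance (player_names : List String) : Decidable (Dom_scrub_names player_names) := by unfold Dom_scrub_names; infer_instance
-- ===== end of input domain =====

-- B replaces A's four sequential replace scans + accumulator loop by one per-name
-- character-filter pass against a fixed removed-set (objective: simpler).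

-- ===== PORT A =====
def scrub_names (player_names : List String) : List String :=
  player_names.foldl (fun scrubbed_names name =>
    let name := PySem.Str.replace name "+" ""
    let name := PySem.Str.replace name "*" ""
    let name := PySem.Str.replace name "'" ""
    let name := PySem.Str.replace name "." ""
    let name := PySem.Str.upper name
    scrubbed_names ++ [name]) []

-- ===== PORT B =====
def scrubRemoved : List Char := ['+', '*', '\'', '.']

def scrub_names_alt (player_names : List String) : List String :=
  player_names.map (fun name =>
    PySem.Str.upper (String.ofList (name.toList.filter (fun c => !(scrubRemoved.contains c)))))

-- ===== PRECONDITION & SPEC =====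
def Spec_scrub_names (player_names : List String) (out : List String) : Prop := out = scrub_names_alt player_names
instance (player_names : List String) (out : List String) : Decidable (Spec_scrub_names player_names out) := by unfold Spec_scrub_names; infer_instance

-- ===== CLAIM (what is proved, stated in full; the proofs are below) =====
def Claim_equal_scrub_names : Prop := ∀ (player_names : List String), Dom_scrub_names player_names → Spec_scrub_names player_names (scrub_names player_names)

-- ===== LEMMAS AND PROOFS =====

-- replace.go with a one-char pattern and empty replacement is a filter
lemma replace_go_filter (c : Char) (fuel : Nat) (l acc : List Char) (h : l.length ≤ fuel) :
    PySem.Chars.replace.go [c] [] fuel l acc = acc.reverse ++ l.filter (fun x => x ≠ c) := by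
  induction fuel generalizing l acc with
  | zero =>
    have : l = [] := List.eq_nil_of_length_eq_zero (Nat.le_zero.mp h)
    subst this; simp [PySem.Chars.replace.go]
  | succ n ih =>
    cases l with
    | nil => simp [PySem.Chars.replace.go]
    | cons x t =>
      simp only [PySem.Chars.replace.go, List.isPrefixOf]
      by_cases hx : x = c
      · subst hx
        simp only [beq_self_eq_true, Bool.true_and, if_true, List.drop_succ_cons,
          List.reverse_nil, List.nil_append, List.length_cons, List.length_nil,
          List.drop_zero] at *
        rw [ih t acc (Nat.le_of_succ_le_succ h)]
        simp
      · have hbeq : (c == x) = false := by simp; exact fun he => hx he.symm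
        simp only [hbeq, Bool.false_and]
        rw [ih t (x :: acc) (Nat.le_of_succ_le_succ h)]
        simp [hx]

lemma replace_single_char (c : Char) (s : List Char) :
    PySem.Chars.replace s [c] [] = s.filter (fun x => x ≠ c) := by
  rw [PySem.Chars.replace]
  simp only [List.isEmpty_cons, if_false, Bool.false_eq_true]
  exact replace_go_filter c s.length s [] (le_refl _)

lemma per_name (name : String) :
    PySem.Str.upper (PySem.Str.replace (PySem.Str.replace (PySem.Str.replace
      (PySem.Str.replace name "+" "") "*" "") "'" "") "." "")
    = PySem.Str.upper (String.ofList (name.toList.filter (fun c => !(scrubRemoved.contains c)))) := by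
  simp only [PySem.Str.replace, PySem.Str.upper, String.toList_ofList]
  congr 1
  rw [show ("+" : String).toList = ['+'] from rfl, show ("*" : String).toList = ['*'] from rfl,
      show ("'" : String).toList = ['\''] from rfl, show ("." : String).toList = ['.'] from rfl,
      show ("" : String).toList = [] from rfl]
  rw [replace_single_char, replace_single_char, replace_single_char, replace_single_char]
  simp only [List.filter_filter, scrubRemoved]
  congr 1
  apply List.filter_congr
  intro x _
  simp only [List.contains_cons, List.contains_nil, Bool.or_false]
  by_cases h1 : x = '+' <;> by_cases h2 : x = '*' <;> by_cases h3 : x = '\'' <;>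
    by_cases h4 : x = '.' <;> simp_all

lemma foldl_scrub (player_names : List String) (acc : List String) :
    player_names.foldl (fun scrubbed_names name =>
      let name := PySem.Str.replace name "+" ""
      let name := PySem.Str.replace name "*" ""
      let name := PySem.Str.replace name "'" ""
      let name := PySem.Str.replace name "." ""
      let name := PySem.Str.upper name
      scrubbed_names ++ [name]) acc
    = acc ++ player_names.map (fun name =>
        PySem.Str.upper (String.ofList (name.toList.filter (fun c => !(scrubRemoved.contains c))))) := by
  induction player_names generalizing acc with
  | nil => simp
  | cons hd tl ih =>
    simp only [List.foldl_cons, List.map_cons]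
    rw [ih]
    simp [per_name hd]

-- ===== VERDICT (by name: the statement is the Claim_ definition above) =====
theorem scrub_names_spec : Claim_equal_scrub_names := by
  intro player_names _
  show scrub_names player_names = scrub_names_alt player_names
  unfold scrub_names scrub_names_alt
  simpa using foldl_scrub player_names []
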